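-- pv_equiv track=rewrite | github.com/GoldenRodger5/nutrivize | backend/app/improved_resilience.py | assign_cuisine_rotation
-- ===== SOURCE A (Python) =====
-- def assign_cuisine_rotation(days, meal_types):
--     """Ensures cuisine variety across the meal plan"""
--     cuisines = [
--         "Mediterranean", "Asian", "Mexican", "American", "Indian",
--         "Middle Eastern", "Italian", "French", "Thai", "Japanese"
--     ]
--
--     rotation = {}
--     cuisine_index = 0
--
--     for day in range(days):
--         rotation[day] = {}
--         for meal_type in meal_types:
--             # Assign next cuisine in rotation
--             rotation[day][meal_type] = cuisines[cuisine_index % len(cuisines)]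
--             cuisine_index += 1
--
--     return rotation
-- ===== SOURCE B (Python) =====
-- def assign_cuisine_rotation(days, meal_types):
--     """Ensures cuisine variety across the meal plan"""
--     cuisines = [
--         "Mediterranean", "Asian", "Mexican", "American", "Indian",
--         "Middle Eastern", "Italian", "French", "Thai", "Japanese"
--     ]
--     m = len(meal_types)
--     total = max(days, 0) * m
--     # Stage 1: materialise the whole cyclic cuisine stream up front.
--     flat = cuisines * (-(-total // len(cuisines)))
--     # Stage 2: cut the stream into per-day chunks and pair them with the meal types.
--     return {day: dict(zip(meal_types, flat[day * m:(day + 1) * m]))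
--             for day in range(days)}
-- ===== Notes on version B (the rewrite author's own statement) =====
-- stated objective: alternative
-- what changed: Instead of threading a mutating cuisine_index counter through two nested loops, B materialises the whole cyclic cuisine stream once (list repetition up to ceil(total/10) copies), then slices it into per-day chunks and builds each day's dict with dict(zip(meal_types, chunk)).
import Mathlib
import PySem

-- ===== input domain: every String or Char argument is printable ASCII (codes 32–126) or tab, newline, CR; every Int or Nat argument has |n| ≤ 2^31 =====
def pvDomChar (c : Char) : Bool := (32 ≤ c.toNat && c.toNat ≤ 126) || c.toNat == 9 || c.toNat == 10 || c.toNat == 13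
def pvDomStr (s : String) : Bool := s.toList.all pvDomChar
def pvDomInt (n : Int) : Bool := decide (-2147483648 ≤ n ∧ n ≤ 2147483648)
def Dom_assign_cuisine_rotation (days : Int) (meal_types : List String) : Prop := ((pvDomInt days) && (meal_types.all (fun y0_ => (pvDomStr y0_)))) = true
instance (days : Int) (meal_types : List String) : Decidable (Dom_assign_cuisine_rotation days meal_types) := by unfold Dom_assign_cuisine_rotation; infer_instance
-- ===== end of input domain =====

-- B materialises the whole cyclic cuisine stream once (list repetition), then slices it into
-- per-day chunks zipped with the meal types, instead of threading a mutating counter through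
-- two nested loops (alternative decomposition; same cost).

-- ===== PORT A =====
def pvCuisines : List String :=
  ["Mediterranean", "Asian", "Mexican", "American", "Indian",
   "Middle Eastern", "Italian", "French", "Thai", "Japanese"]

-- rotation is an insertion-ordered association list (day keys from range(days) are distinct and
-- fresh); the inner dict is a PySem.Dict mutated exactly as Python's rotation[day][meal_type] = …
def assign_cuisine_rotation (days : Int) (meal_types : List String) : List (Int × List (String × String)) :=
  let cuisines := pvCuisines
  let result :=
    (PySem.List.pyRange 0 days 1).foldl
      (fun (st : List (Int × PySem.Dict String String) × Int) (day : Int) =>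
        let p := meal_types.foldl
          (fun (p : PySem.Dict String String × Int) (mt : String) =>
            (p.1.insert mt (PySem.List.pyGetD cuisines (PySem.Int.mod p.2 (cuisines.length : Int)) ""),
             p.2 + 1))
          (PySem.Dict.empty, st.2)
        (st.1 ++ [(day, p.1)], p.2))
      ([], 0)
  result.1.map (fun p => (p.1, p.2.items))

-- ===== PORT B =====
-- stage 1: the flat cyclic stream 'cuisines * ceil(total/len(cuisines))';
-- stage 2: per-day slices of it, zipped with meal_types into a dict (dict(zip(...)))
def assign_cuisine_rotation_alt (days : Int) (meal_types : List String) : List (Int × List (String × String)) :=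
  let cuisines := pvCuisines
  let m : Int := (meal_types.length : Int)
  let total : Int := max days 0 * m
  let reps : Int := -(PySem.Int.floordiv (-total) (cuisines.length : Int))
  let flat : List String := (List.replicate reps.toNat cuisines).flatten
  (PySem.List.pyRange 0 days 1).map (fun day =>
    (day,
     ((meal_types.zip (PySem.List.slice flat (some (day * m)) (some ((day + 1) * m)))).foldl
        (fun (d : PySem.Dict String String) (q : String × String) => d.insert q.1 q.2)
        PySem.Dict.empty).items))

-- ===== PRECONDITION & SPEC =====
def Spec_assign_cuisine_rotation (days : Int) (meal_types : List String) (out : List (Int × List (String × String))) : Prop := out = assign_cuisine_rotation_alt days meal_types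
instance (days : Int) (meal_types : List String) (out : List (Int × List (String × String))) : Decidable (Spec_assign_cuisine_rotation days meal_types out) := by unfold Spec_assign_cuisine_rotation; infer_instance

-- ===== CLAIM (what is proved, stated in full; the proofs are below) =====
def Claim_equal_assign_cuisine_rotation : Prop := ∀ (days : Int) (meal_types : List String), Dom_assign_cuisine_rotation days meal_types → Spec_assign_cuisine_rotation days meal_types (assign_cuisine_rotation days meal_types)

-- ===== LEMMAS AND PROOFS =====

-- the ideal chunk: mn cuisine names starting at stream offset off
def pvRowIdx (mn off : Nat) : List String :=
  (List.range mn).map (fun j => PySem.List.pyGetD pvCuisines (((off + j) % 10 : Nat) : Int) "")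

-- the dict a day's row denotes, built B-style from the ideal chunk
def pvRowB (mts : List String) (off : Nat) : PySem.Dict String String :=
  (mts.zip (pvRowIdx mts.length off)).foldl
    (fun (d : PySem.Dict String String) (q : String × String) => d.insert q.1 q.2)
    PySem.Dict.empty

theorem pvCuisines_len : pvCuisines.length = 10 := rfl

theorem pvRowIdx_succ (n off : Nat) :
    pvRowIdx (n + 1) off
      = PySem.List.pyGetD pvCuisines ((off % 10 : Nat) : Int) "" :: pvRowIdx n (off + 1) := by
  unfold pvRowIdx
  rw [List.range_succ_eq_map]
  simp only [List.map_cons, List.map_map, Nat.add_zero]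
  refine congrArg₂ _ rfl ?_
  apply List.map_congr_left
  intro j _
  simp only [Function.comp]
  congr 2
  omega

-- A's inner loop started at counter off equals the B-style zip-fold over the ideal chunk
theorem pv_inner (mts : List String) : ∀ (d0 : PySem.Dict String String) (off : Nat),
    mts.foldl
      (fun (p : PySem.Dict String String × Int) (mt : String) =>
        (p.1.insert mt (PySem.List.pyGetD pvCuisines (PySem.Int.mod p.2 (pvCuisines.length : Int)) ""),
         p.2 + 1)) (d0, (off : Int))
    = ((mts.zip (pvRowIdx mts.length off)).foldl
        (fun (d : PySem.Dict String String) (q : String × String) => d.insert q.1 q.2) d0,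
       (off : Int) + (mts.length : Int)) := by
  induction mts with
  | nil => intro d0 off; simp [pvRowIdx]
  | cons x xs ih =>
      intro d0 off
      simp only [List.length_cons, pvRowIdx_succ, List.zip_cons_cons, List.foldl_cons]
      have h1 : ((off : Int) + 1) = ((off + 1 : Nat) : Int) := by push_cast; ring
      rw [h1, ih]
      have h2 : PySem.Int.mod ((off : Nat) : Int) ((pvCuisines.length : Nat) : Int)
          = (((off % 10 : Nat)) : Int) := by
        rw [pvCuisines_len]; exact PySem.Int.mod_natCast off 10
      rw [h2]
      simp only [Prod.mk.injEq]
      exact ⟨trivial, by push_cast; ring⟩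

-- A's outer loop over range a..a+n, entered with counter a*len(meal_types)
theorem pv_outer (mts : List String) (n : Nat) : ∀ (a : Nat) (acc : List (Int × PySem.Dict String String)),
    (PySem.List.pyRange (a : Int) ((a : Int) + (n : Int)) 1).foldl
      (fun (st : List (Int × PySem.Dict String String) × Int) (day : Int) =>
        (st.1 ++ [(day,
            (mts.foldl
              (fun (p : PySem.Dict String String × Int) (mt : String) =>
                (p.1.insert mt (PySem.List.pyGetD pvCuisines (PySem.Int.mod p.2 (pvCuisines.length : Int)) ""),
                 p.2 + 1))
              (PySem.Dict.empty, st.2)).1)],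
         (mts.foldl
           (fun (p : PySem.Dict String String × Int) (mt : String) =>
             (p.1.insert mt (PySem.List.pyGetD pvCuisines (PySem.Int.mod p.2 (pvCuisines.length : Int)) ""),
              p.2 + 1))
           (PySem.Dict.empty, st.2)).2))
      (acc, ((a * mts.length : Nat) : Int))
    = (acc ++ (List.range n).map (fun i => (((a + i : Nat) : Int), pvRowB mts ((a + i) * mts.length))),
       (((a + n) * mts.length : Nat) : Int)) := by
  induction n with
  | zero =>
      intro a acc
      rw [show ((a : Int) + ((0 : Nat) : Int)) = (a : Int) by push_cast; ring,
          PySem.List.pyRange_one_eq_nil (le_refl _)]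
      simp
  | succ k ih =>
      intro a acc
      rw [PySem.List.pyRange_one_cons (by push_cast; omega : (a : Int) < (a : Int) + ((k + 1 : Nat) : Int))]
      simp only [List.foldl_cons]
      rw [pv_inner mts PySem.Dict.empty (a * mts.length)]
      simp only
      have hc : ((a * mts.length : Nat) : Int) + (mts.length : Int) = (((a + 1) * mts.length : Nat) : Int) := by
        push_cast; ring
      have hs : ((a : Int) + 1) = ((a + 1 : Nat) : Int) := by push_cast; ring
      have hr : (a : Int) + ((k + 1 : Nat) : Int) = ((a + 1 : Nat) : Int) + ((k : Nat) : Int) := by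
        push_cast; ring
      have hfold : (mts.zip (pvRowIdx mts.length (a * mts.length))).foldl
          (fun (d : PySem.Dict String String) (q : String × String) => d.insert q.1 q.2)
          PySem.Dict.empty = pvRowB mts (a * mts.length) := rfl
      rw [hfold]
      rw [hc, hs, hr, ih (a + 1) (acc ++ [((a : Int), pvRowB mts (a * mts.length))])]
      rw [List.range_succ_eq_map]
      simp only [List.map_cons, List.map_map, List.append_assoc, List.singleton_append,
        Nat.add_zero, Prod.mk.injEq]
      refine ⟨congrArg₂ _ rfl (congrArg₂ _ rfl ?_), by refine congrArg _ ?_; ring⟩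
      apply List.map_congr_left
      intro j _
      simp only [Function.comp]
      have : a + (j + 1) = a + 1 + j := by omega
      rw [this]

-- elements of the repeated-cuisines stream
theorem pv_flat_get (r : Nat) : ∀ (k : Nat), k < r * 10 →
    ((List.replicate r pvCuisines).flatten)[k]? = pvCuisines[k % 10]? := by
  induction r with
  | zero => intro k hk; omega
  | succ s ih =>
      intro k hk
      rw [List.replicate_succ, List.flatten_cons]
      by_cases h : k < 10
      · rw [List.getElem?_append_left (by rw [pvCuisines_len]; omega)]
        congr 1; omega
      · rw [List.getElem?_append_right (by rw [pvCuisines_len]; omega)]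
        rw [pvCuisines_len, ih (k - 10) (by omega)]
        congr 1; omega

-- the slice B takes for day k IS the ideal chunk
theorem pv_chunk (r mn k : Nat) (hk : (k + 1) * mn ≤ r * 10) :
    PySem.List.slice ((List.replicate r pvCuisines).flatten)
        (some ((k * mn : Nat) : Int)) (some (((k * mn : Nat) : Int) + (mn : Int)))
      = pvRowIdx mn (k * mn) := by
  rw [PySem.List.slice_natCast_add]
  apply List.ext_getElem?
  intro j
  by_cases hj : j < mn
  · rw [List.getElem?_take, if_pos hj, List.getElem?_drop]
    have hlt : k * mn + j < r * 10 := by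
      have := hk; nlinarith
    rw [pv_flat_get r (k * mn + j) hlt]
    unfold pvRowIdx
    rw [List.getElem?_map, List.getElem?_range hj]
    simp only [Option.map_some]
    rw [PySem.List.pyGetD_natCast]
    have hm : (k * mn + j) % 10 < pvCuisines.length := by rw [pvCuisines_len]; omega
    rw [List.getD_eq_getElem _ _ hm, List.getElem?_eq_getElem hm]
  · rw [List.getElem?_take, if_neg hj]
    unfold pvRowIdx
    rw [List.getElem?_map, List.getElem?_eq_none (by simpa using hj)]
    rfl

-- ceiling-division bound: the stream is long enough for every day
theorem pv_reps_bound (t : Int) :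
    t ≤ -(PySem.Int.floordiv (-t) ((10 : Nat) : Int)) * ((10 : Nat) : Int) := by
  have h := (PySem.Int.neg_floordiv_neg_eq_iff_of_pos (a := t) (b := ((10 : Nat) : Int))
      (q := -(PySem.Int.floordiv (-t) ((10 : Nat) : Int))) (by norm_num)).mp rfl
  exact h.2

theorem pv_eq (days : Int) (mts : List String) :
    assign_cuisine_rotation days mts = assign_cuisine_rotation_alt days mts := by
  unfold assign_cuisine_rotation assign_cuisine_rotation_alt
  by_cases h : days ≤ 0
  · rw [PySem.List.pyRange_one_eq_nil h]
    simp
  · -- n = number of days; everything becomes a map over List.range n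
    set n : Nat := days.toNat with hn
    have hdays : days = ((n : Nat) : Int) := by omega
    set m : Nat := mts.length with hm
    -- the A side via pv_outer at a = 0
    have hA := pv_outer mts n 0 []
    rw [show (((0 : Nat) : Int)) = (0 : Int) from rfl] at hA
    simp only [Nat.zero_mul, Nat.cast_zero, List.nil_append, zero_add] at hA
    simp only
    rw [hdays, hA]
    -- the B side: evaluate reps / flat, rewrite the range, and match rows
    rw [PySem.List.pyRange_one 0 ((n : Nat) : Int)]
    simp only [sub_zero, Int.toNat_natCast, List.map_map]
    have hmax : max ((n : Nat) : Int) 0 = ((n : Nat) : Int) := by omega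
    rw [hmax, pvCuisines_len]
    set reps : Int := -(PySem.Int.floordiv (-(((n : Nat) : Int) * ((m : Nat) : Int))) ((10 : Nat) : Int)) with hreps
    have hbound : ((n * m : Nat) : Int) ≤ reps * ((10 : Nat) : Int) := by
      have := pv_reps_bound (((n : Nat) : Int) * ((m : Nat) : Int))
      rw [hreps]; push_cast; push_cast at this; exact this
    have hrep0 : 0 ≤ reps := by
      by_contra hneg
      rw [not_le] at hneg
      have : reps * ((10 : Nat) : Int) < 0 := by push_cast; nlinarith
      have h0 : (0 : Int) ≤ ((n * m : Nat) : Int) := by positivity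
      omega
    have hNat : n * m ≤ reps.toNat * 10 := by
      have h10 : ((10 : Nat) : Int) = (10 : Int) := by norm_num
      rw [h10] at hbound
      omega
    apply List.map_congr_left
    intro k hk
    rw [List.mem_range] at hk
    simp only [Function.comp, zero_add]
    refine congrArg₂ _ rfl (congrArg _ ?_)
    have e1 : ((k : Nat) : Int) * ((m : Nat) : Int) = ((k * m : Nat) : Int) := by push_cast; ring
    have e2 : (((k : Nat) : Int) + 1) * ((m : Nat) : Int) = ((k * m : Nat) : Int) + ((m : Nat) : Int) := by
      push_cast; ring
    have hkm : (k + 1) * m ≤ reps.toNat * 10 :=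
      le_trans (Nat.mul_le_mul_right m hk) hNat
    rw [e1, e2, pv_chunk reps.toNat m k hkm]
    rfl

-- ===== VERDICT (by name: the statement is the Claim_ definition above) =====
theorem assign_cuisine_rotation_spec : Claim_equal_assign_cuisine_rotation := by
  intro days mts _
  exact pv_eq days mts
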